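-- pv_equiv track=rewrite | github.com/JuliethOmbita/Code_Immersives-PY111- | Day 13 - Stadistic/Activity12.3-5-JuliethOmbita.py | aproGrades
-- ===== SOURCE A (Python) =====
-- def aproGrades(listNum):
--     aproved = 0
--     failed = 0
--     for i in range(len(listNum)):
--         if listNum[i] < 55:
--             failed += 1
--         else:
--             aproved += 1
--     return failed, aproved
-- ===== SOURCE B (Python) =====
-- def aproGrades(listNum):
--     s = sorted(listNum)
--     lo, hi = 0, len(s)
--     while lo < hi:
--         mid = (lo + hi) // 2
--         if s[mid] < 55:
--             lo = mid + 1
--         else: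
--             hi = mid
--     return lo, len(s) - lo
-- ===== Notes on version B (the rewrite author's own statement) =====
-- stated objective: alternative
-- what changed: Sorts the grades and binary-searches for the partition point of the threshold 55; the index found is the failed count and passed is len minus it, replacing the counting loop entirely.
import Mathlib
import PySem

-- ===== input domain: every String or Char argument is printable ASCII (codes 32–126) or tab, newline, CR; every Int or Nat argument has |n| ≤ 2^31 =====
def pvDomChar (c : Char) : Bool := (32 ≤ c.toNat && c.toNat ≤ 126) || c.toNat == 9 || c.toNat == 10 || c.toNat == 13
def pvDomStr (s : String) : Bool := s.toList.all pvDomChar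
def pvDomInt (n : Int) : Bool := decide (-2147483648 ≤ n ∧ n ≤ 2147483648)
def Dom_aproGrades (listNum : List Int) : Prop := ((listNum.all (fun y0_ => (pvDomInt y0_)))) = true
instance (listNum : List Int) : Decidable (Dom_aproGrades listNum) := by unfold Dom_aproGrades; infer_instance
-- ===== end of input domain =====

-- B sorts the grades and binary-searches the partition point of 55 (failed = that index,
-- passed = len - index) instead of counting in a loop; alternative algorithm, not faster.

-- ===== PORT A =====
-- A: index loop over range(len), two counters (aproved, failed) updated per branch.
def aproGrades (listNum : List Int) : Int × Int :=
  let st := (PySem.List.pyRange 0 listNum.length 1).foldl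
    (fun (st : Int × Int) i =>
      match PySem.List.pyGet? listNum i with
      | some v => if v < 55 then (st.1, st.2 + 1) else (st.1 + 1, st.2)
      | none => st)  -- unreachable: i always in range
    (0, 0)
  (st.2, st.1)

-- ===== PORT B =====
-- B's hand-written while loop: binary search for the first index with s[mid] ≥ 55.
-- s[mid] is always in range here (0 ≤ lo ≤ mid < hi ≤ len), so pyGetD's default is unreachable.
def aproAltLoop (s : List Int) (lo hi : Int) : Int :=
  if h : lo < hi then
    let mid := PySem.Int.floordiv (lo + hi) 2
    if PySem.List.pyGetD s mid 0 < 55 then aproAltLoop s (mid + 1) hi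
    else aproAltLoop s lo mid
  else lo
termination_by (hi - lo).toNat
decreasing_by
  · have hb := PySem.Int.floordiv_two_mid_bounds (le_of_lt h)
    omega
  · have hlt : PySem.Int.floordiv (lo + hi) 2 < hi := by
      rw [PySem.Int.floordiv_lt_iff_lt_mul (by omega : (0:Int) < 2)]
      omega
    omega

-- B: sorted(listNum), then the while loop, return (lo, len - lo).
def aproGrades_alt (listNum : List Int) : Int × Int :=
  let s := PySem.List.sorted listNum (fun x => x) false
  let lo := aproAltLoop s 0 (s.length : Int)
  (lo, (s.length : Int) - lo)

-- ===== PRECONDITION & SPEC =====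
def Spec_aproGrades (listNum : List Int) (out : Int × Int) : Prop := out = aproGrades_alt listNum
instance (listNum : List Int) (out : Int × Int) : Decidable (Spec_aproGrades listNum out) := by unfold Spec_aproGrades; infer_instance

-- ===== CLAIM (what is proved, stated in full; the proofs are below) =====
def Claim_equal_aproGrades : Prop := ∀ (listNum : List Int), Dom_aproGrades listNum → Spec_aproGrades listNum (aproGrades listNum)

-- ===== LEMMAS AND PROOFS =====

def aproStep (st : Int × Int) (v : Int) : Int × Int :=
  if v < 55 then (st.1, st.2 + 1) else (st.1 + 1, st.2)

theorem aproGrades_fold_counts (xs : List Int) (a b : Int) :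
    xs.foldl aproStep (a, b)
      = (a + (xs.length : Int) - ((xs.countP (fun g => g < 55)) : Int),
         b + ((xs.countP (fun g => g < 55)) : Int)) := by
  induction xs generalizing a b with
  | nil => simp
  | cons x xs ih =>
    by_cases h : x < 55 <;>
      simp [aproStep, h, ih] <;> omega

-- A's loop equals (failed, passed) = (countP (<55), len - countP (<55)).
theorem aproGrades_eq_counts (listNum : List Int) :
    aproGrades listNum
      = (((listNum.countP (fun g => g < 55)) : Int),
         (listNum.length : Int) - ((listNum.countP (fun g => g < 55)) : Int)) := by
  unfold aproGrades
  have hcong : (PySem.List.pyRange 0 listNum.length 1).foldl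
      (fun (st : Int × Int) i =>
        match PySem.List.pyGet? listNum i with
        | some v => if v < 55 then (st.1, st.2 + 1) else (st.1 + 1, st.2)
        | none => st) (0, 0)
    = (PySem.List.pyRange 0 listNum.length 1).foldl
      (fun (st : Int × Int) i => aproStep st (PySem.List.pyGetD listNum i 0)) (0, 0) := by
    apply PySem.List.foldl_congr_mem
    intro st i hi
    have hmem := PySem.List.mem_pyRange_one.mp hi
    obtain ⟨n, rfl⟩ := Int.eq_ofNat_of_zero_le hmem.1
    have hn : n < listNum.length := by exact_mod_cast hmem.2
    rw [PySem.List.pyGet?_natCast, PySem.List.pyGetD_natCast]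
    simp [aproStep, List.getElem?_eq_getElem hn]
  simp only [hcong,
    PySem.List.foldl_pyRange_zero_pyGetD' listNum 0 aproStep ((0 : Int), (0 : Int)),
    aproGrades_fold_counts]
  simp

-- If the predicate holds exactly on the first k positions, countP = k.
theorem countP_of_partition (s : List Int) (k : Nat) (hk : k ≤ s.length)
    (h1 : ∀ i (h : i < s.length), i < k → s[i] < 55)
    (h2 : ∀ i (h : i < s.length), k ≤ i → ¬ s[i] < 55) :
    s.countP (fun g => decide (g < 55)) = k := by
  conv_lhs => rw [← List.take_append_drop k s]
  rw [List.countP_append]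
  have htake : (s.take k).countP (fun g => decide (g < 55)) = (s.take k).length := by
    rw [List.countP_eq_length]
    intro a ha
    obtain ⟨i, hi, rfl⟩ := List.mem_iff_getElem.mp ha
    have hil : i < s.length := by
      have := hi; rw [List.length_take] at this; omega
    rw [List.getElem_take]
    have hik : i < k := by have := hi; rw [List.length_take] at this; omega
    simpa using h1 i hil hik
  have hdrop : (s.drop k).countP (fun g => decide (g < 55)) = 0 := by
    rw [List.countP_eq_zero]
    intro a ha
    obtain ⟨i, hi, rfl⟩ := List.mem_iff_getElem.mp ha
    rw [List.getElem_drop]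
    have hil : k + i < s.length := by have := hi; rw [List.length_drop] at this; omega
    simpa using h2 (k + i) hil (by omega)
  rw [htake, hdrop, List.length_take]
  omega

-- Loop invariant: on a sorted list, with everything left of lo failing and everything
-- from hi on passing, the search returns the failing count.
-- At lo = hi, the partition is complete: the loop value lo is the failing count.
theorem aproAltLoop_base (s : List Int) (hi : Int) (h0 : 0 ≤ hi) (hlen : hi ≤ (s.length : Int))
    (hlo : ∀ i (h : i < s.length), (i : Int) < hi → s[i] < 55)
    (hhi : ∀ i (h : i < s.length), hi ≤ (i : Int) → ¬ s[i] < 55) :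
    aproAltLoop s hi hi = ((s.countP (fun g => decide (g < 55))) : Int) := by
  rw [aproAltLoop]
  simp only [lt_irrefl, dite_false]
  have : s.countP (fun g => decide (g < 55)) = hi.toNat := by
    apply countP_of_partition s hi.toNat (by omega)
    · intro i h hik; exact hlo i h (by omega)
    · intro i h hik; exact hhi i h (by omega)
  rw [this]; omega

theorem aproAltLoop_inv (s : List Int) (hs : s.Pairwise (· ≤ ·)) :
    ∀ (n : Nat) (lo hi : Int), (hi - lo).toNat ≤ n → 0 ≤ lo → lo ≤ hi → hi ≤ (s.length : Int) →
    (∀ i (h : i < s.length), (i : Int) < lo → s[i] < 55) →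
    (∀ i (h : i < s.length), hi ≤ (i : Int) → ¬ s[i] < 55) →
    aproAltLoop s lo hi = ((s.countP (fun g => decide (g < 55))) : Int) := by
  intro n
  induction n with
  | zero =>
    intro lo hi hfuel h0 hle hlen hlo hhi
    have hEq : lo = hi := by omega
    subst hEq
    exact aproAltLoop_base s lo h0 hlen hlo hhi
  | succ n ih =>
    intro lo hi hfuel h0 hle hlen hlo hhi
    rw [aproAltLoop]
    by_cases h : lo < hi
    · simp only [h, dite_true]
      set mid := PySem.Int.floordiv (lo + hi) 2 with hmid
      have hb := PySem.Int.floordiv_two_mid_bounds (le_of_lt h)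
      have hmlt : mid < hi := by
        rw [hmid, PySem.Int.floordiv_lt_iff_lt_mul (by omega : (0:Int) < 2)]
        omega
      have hmrange : 0 ≤ mid ∧ mid < (s.length : Int) := by omega
      have hget : PySem.List.pyGetD s mid 0 = s[mid.toNat]'(by omega) :=
        PySem.List.pyGetD_eq_getElem s (i := mid) 0 hmrange.1 (by exact_mod_cast hmrange.2)
      have hmono : ∀ (p q : Nat) (hp : p < s.length) (hq : q < s.length), p ≤ q → s[p] ≤ s[q] := by
        intro p q hp hq hpq
        rcases Nat.lt_or_ge p q with hlt | hge
        · exact (List.pairwise_iff_getElem.mp hs) p q hp hq hlt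
        · have : p = q := by omega
          subst this; exact le_refl _
      by_cases hv : PySem.List.pyGetD s mid 0 < 55
      · simp only [hv, if_true]
        apply ih (mid + 1) hi (by omega) (by omega) (by omega) hlen
        · intro i hi' hil
          have : s[i] ≤ s[mid.toNat]'(by omega) := hmono i mid.toNat hi' (by omega) (by omega)
          rw [hget] at hv; omega
        · exact hhi
      · simp only [hv, if_false]
        apply ih lo mid (by omega) h0 (by omega) (by omega) hlo
        · intro i hi' hil
          have : s[mid.toNat]'(by omega) ≤ s[i] := hmono mid.toNat i (by omega) hi' (by omega)
          rw [hget] at hv; omega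
    · have hEq : lo = hi := by omega
      subst hEq
      rw [← aproAltLoop]
      exact aproAltLoop_base s lo h0 hlen hlo hhi

theorem aproGrades_loop_eq (listNum : List Int) :
    aproGrades listNum = aproGrades_alt listNum := by
  set s := PySem.List.sorted listNum (fun x => x) false with hsdef
  have hperm : s.Perm listNum := PySem.List.sorted_perm listNum (fun x => x) false
  have hpw : s.Pairwise (· ≤ ·) := by
    have := PySem.List.sorted_pairwise listNum (fun x => x)
    simpa using this
  have hlen : s.length = listNum.length := hperm.length_eq
  have hloop : aproAltLoop s 0 (s.length : Int)
      = ((s.countP (fun g => decide (g < 55))) : Int) := by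
    apply aproAltLoop_inv s hpw (s.length : Int).toNat 0 (s.length : Int) (by omega)
      (by omega) (by omega) (by omega)
    · intro i h hil; omega
    · intro i h hil; exfalso; omega
  have hcount : s.countP (fun g => decide (g < 55)) = listNum.countP (fun g => decide (g < 55)) :=
    hperm.countP_eq _
  rw [hlen, hcount] at hloop
  have hrfl : aproGrades_alt listNum
      = (aproAltLoop s 0 (s.length : Int), (s.length : Int) - aproAltLoop s 0 (s.length : Int)) := rfl
  rw [aproGrades_eq_counts, hrfl, hlen, hloop]

-- ===== VERDICT (by name: the statement is the Claim_ definition above) =====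
theorem aproGrades_spec : Claim_equal_aproGrades := by
  intro l _
  unfold Spec_aproGrades
  exact aproGrades_loop_eq l
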